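-- pv_equiv track=rewrite | github.com/HareIam/opensmile | opensmile_main.py | ArfftoCsv
-- ===== SOURCE A (Python) =====
-- def ArfftoCsv(content):
--
--     data = False
--     header = ""
--     newContent = []
--     for line in content:
--         if not data:
--             if "@attribute" in line:
--                 attri = line.split()
--                 columnName = attri[attri.index("@attribute")+1]
--                 header = header + columnName + ","
--             elif "@data" in line:
--                 data = True
--                 header = header[:-1]
--                 #header += '\n'
--                 newContent.append(header)
--         else:
--             newContent.append(line)
--     return newContent
-- ===== SOURCE B (Python) =====
-- def _column_name(line):
--     tokens = line.split()
--     return tokens[tokens.index("@attribute") + 1]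
--
--
-- def ArfftoCsv(content):
--     lines = list(content)
--     boundary = next((i for i, line in enumerate(lines)
--                      if "@data" in line and "@attribute" not in line), None)
--     if boundary is None:
--         return []
--     header = ",".join(_column_name(line)
--                       for line in lines[:boundary] if "@attribute" in line)
--     return [header] + lines[boundary + 1:]
-- ===== Notes on version B (the rewrite author's own statement) =====
-- stated objective: simpler
-- what changed: Replaces the flag-driven accumulator loop (string concatenation plus trailing-comma slicing) by first locating the '@data' boundary index, then building the header with ','.join over the attribute lines before it and returning [header] + the lines after it.
-- crash fix: On inputs with no '@data'-only line but containing a line with the substring '@attribute' whose whitespace-split tokens lack an exact '@attribute' token or end with it, A raises ValueError/IndexError while B returns an empty result list. — e.g. on ArfftoCsv(["@attribute"]): A raises IndexError, B returns []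
import Mathlib
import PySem

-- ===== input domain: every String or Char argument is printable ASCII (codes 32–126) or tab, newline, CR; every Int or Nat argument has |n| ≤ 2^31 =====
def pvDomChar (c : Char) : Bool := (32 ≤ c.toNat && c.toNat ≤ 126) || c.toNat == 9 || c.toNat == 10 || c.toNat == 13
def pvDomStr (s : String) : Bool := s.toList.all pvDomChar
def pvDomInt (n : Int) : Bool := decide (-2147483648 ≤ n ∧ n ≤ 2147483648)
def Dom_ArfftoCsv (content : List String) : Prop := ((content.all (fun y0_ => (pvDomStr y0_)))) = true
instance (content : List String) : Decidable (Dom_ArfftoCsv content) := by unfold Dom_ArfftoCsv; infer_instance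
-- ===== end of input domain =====

-- B replaces A's flag-driven accumulator loop by locating the '@data' boundary first, then
-- joining the attribute column names before it and returning the lines after it (objective: simpler).

-- ===== PORT A =====
-- The Python str 'header' is held as List Char (Lean's own String.append is kernel-opaque).
-- Where the Python raises (tokens.index ValueError / tokens[i+1] IndexError) the port's '.getD'
-- defaults fire; Pre_ArfftoCsv excludes exactly those inputs.
def arffStep (st : Bool × List Char × List String) (line : String) :
    Bool × List Char × List String :=
  match st with
  | (data, header, newContent) =>
    if !data then
      if PySem.Str.isIn "@attribute" line then
        let attri := PySem.Str.split₀ line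
        let i := (PySem.List.index? attri "@attribute").getD 0
        let columnName := (PySem.List.pyGet? attri ((i : Int) + 1)).getD ""
        (data, header ++ columnName.toList ++ [','], newContent)
      else if PySem.Str.isIn "@data" line then
        let h := PySem.Chars.slice header none (some (-1))   -- header[:-1]
        (true, h, newContent ++ [String.ofList h])
      else (data, header, newContent)
    else (data, header, newContent ++ [line])

def ArfftoCsv (content : List String) : List String :=
  (content.foldl arffStep (false, [], [])).2.2

-- ===== PORT B =====
def pvIsBoundary (line : String) : Bool :=
  PySem.Str.isIn "@data" line && !PySem.Str.isIn "@attribute" line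

def pvColName (line : String) : String :=
  let tokens := PySem.Str.split₀ line
  match PySem.List.index? tokens "@attribute" with
  | some i => (PySem.List.pyGet? tokens ((i : Int) + 1)).getD ""  -- Pre_ rules the default out
  | none => ""                                                    -- Pre_ rules this branch out

def ArfftoCsv_alt (content : List String) : List String :=
  match content.findIdx? pvIsBoundary with
  | none => []
  | some b =>
    PySem.Str.join ","
        (((content.take b).filter (fun l => PySem.Str.isIn "@attribute" l)).map pvColName)
      :: content.drop (b + 1)

-- ===== PRECONDITION & SPEC =====
-- A raises (ValueError/IndexError) iff some line before the first '@data'-boundary line contains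
-- the substring '@attribute' but its whitespace-split tokens have no exact '@attribute' token or
-- end with it; Pre_ excludes exactly those inputs (A returns on everything else).
def pvGoodAttr (line : String) : Bool :=
  !PySem.Str.isIn "@attribute" line ||
    (match PySem.List.index? (PySem.Str.split₀ line) "@attribute" with
     | some i => decide (i + 1 < (PySem.Str.split₀ line).length)
     | none => false)

def Pre_ArfftoCsv (content : List String) : Prop :=
  (content.takeWhile (fun l => !pvIsBoundary l)).all pvGoodAttr = true

instance (content : List String) : Decidable (Pre_ArfftoCsv content) := by
  unfold Pre_ArfftoCsv; infer_instance

def pvWitness_ArfftoCsv : List String :=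
  ["@attribute name numeric", "@attribute age numeric", "@data", "a,1", "b,2"]

-- On inputs with no '@data'-only line but containing a line with the substring '@attribute' whose
-- whitespace-split tokens lack an exact '@attribute' token or end with it, A raises
-- ValueError/IndexError while B returns an empty result list.
def Raises_ArfftoCsv (content : List String) : Prop :=
  content.findIdx? pvIsBoundary = none ∧ ¬ (content.all pvGoodAttr = true)

instance (content : List String) : Decidable (Raises_ArfftoCsv content) := by
  unfold Raises_ArfftoCsv; infer_instance

def pvRaiseWitness_ArfftoCsv : List String := ["@attribute"]

def pvRaiseWitnessOut_ArfftoCsv : List String := []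

def Spec_ArfftoCsv (content : List String) (out : List String) : Prop := out = ArfftoCsv_alt content
instance (content : List String) (out : List String) : Decidable (Spec_ArfftoCsv content out) := by unfold Spec_ArfftoCsv; infer_instance

-- ===== CLAIM (what is proved, stated in full; the proofs are below) =====
def Claim_equal_ArfftoCsv : Prop := ∀ (content : List String), Dom_ArfftoCsv content → Pre_ArfftoCsv content → Spec_ArfftoCsv content (ArfftoCsv content)

def Claim_raises_ArfftoCsv : Prop :=
  (∀ (content : List String), Dom_ArfftoCsv content → Raises_ArfftoCsv content → ¬ Pre_ArfftoCsv content) ∧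
  (Dom_ArfftoCsv (pvRaiseWitness_ArfftoCsv) ∧ Raises_ArfftoCsv (pvRaiseWitness_ArfftoCsv) ∧
    ArfftoCsv_alt (pvRaiseWitness_ArfftoCsv) = pvRaiseWitnessOut_ArfftoCsv)

-- ===== LEMMAS AND PROOFS =====

/-- The chars A accumulates into `header` while scanning a block of lines. -/
def headerChars (ls : List String) : List Char :=
  ((ls.filter (fun l => PySem.Str.isIn "@attribute" l)).map
      (fun l => (pvColName l).toList ++ [','])).flatten

lemma headerChars_nil : headerChars [] = [] := rfl

lemma headerChars_cons (l : String) (ls : List String) :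
    headerChars (l :: ls) =
      if PySem.Str.isIn "@attribute" l then
        (pvColName l).toList ++ [','] ++ headerChars ls
      else headerChars ls := by
  by_cases h : PySem.Str.isIn "@attribute" l
  · rw [if_pos h]
    simp only [headerChars, List.filter_cons, h, if_true, List.map_cons, List.flatten_cons,
      List.append_assoc]
  · rw [if_neg h]
    simp only [headerChars, List.filter_cons, h, if_false, Bool.false_eq_true]

lemma loopTrue (content : List String) (H : List Char) (acc : List String) :
    (content.foldl arffStep (true, H, acc)).2.2 = acc ++ content := by
  induction content generalizing acc with
  | nil => simp [List.foldl]
  | cons l rest ih => simp [List.foldl, arffStep, ih]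

/-- Dropping the trailing comma of the concatenation is joining with commas. -/
lemma dropLast_flatten_comma (ps : List (List Char)) :
    ((ps.map (· ++ [','])).flatten).dropLast = PySem.Chars.join [','] ps := by
  induction ps with
  | nil => simp [PySem.Chars.join_nil]
  | cons p rest ih =>
    cases rest with
    | nil => simp [PySem.Chars.join_singleton]
    | cons q rest' =>
      rw [List.map_cons, List.flatten_cons, PySem.Chars.join_cons_cons,
        List.dropLast_append_of_ne_nil (by simp), ih]

lemma loopFalse (content : List String) (H : List Char) (acc : List String)
    (hg : ∀ l ∈ content.takeWhile (fun l => !pvIsBoundary l), pvGoodAttr l = true) :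
    (content.foldl arffStep (false, H, acc)).2.2 =
      match content.findIdx? pvIsBoundary with
      | none => acc
      | some b =>
          acc ++ String.ofList ((H ++ headerChars (content.take b)).dropLast)
            :: content.drop (b + 1) := by
  induction content generalizing H acc with
  | nil => simp [List.foldl]
  | cons l rest ih =>
    by_cases hb : pvIsBoundary l
    · have hb' := hb
      simp only [pvIsBoundary, Bool.and_eq_true, Bool.not_eq_true'] at hb'
      obtain ⟨hdata, hattr⟩ := hb'
      have hattr' : PySem.Chars.isIn ['@','a','t','t','r','i','b','u','t','e'] l.toList = false := by
        simpa using hattr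
      have hdata' : PySem.Chars.isIn ['@','d','a','t','a'] l.toList = true := by
        simpa using hdata
      rw [List.foldl_cons]
      have hstep : arffStep (false, H, acc) l =
          (true, PySem.Chars.slice H none (some (-1)),
            acc ++ [String.ofList (PySem.Chars.slice H none (some (-1)))]) := by
        simp [arffStep, hattr', hdata']
      rw [hstep, loopTrue, List.findIdx?_cons, if_pos hb]
      simp [PySem.Chars.slice_eq_listSlice, PySem.List.slice_to_neg_one, headerChars_nil]
    · have hgl : pvGoodAttr l = true := by
        apply hg; rw [List.takeWhile_cons, if_pos (by simp [hb])]; exact List.mem_cons_self ..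
      have hg' : ∀ x ∈ rest.takeWhile (fun l => !pvIsBoundary l), pvGoodAttr x = true := by
        intro x hx
        apply hg; rw [List.takeWhile_cons, if_pos (by simp [hb])]
        exact List.mem_cons_of_mem _ hx
      rw [List.foldl_cons, List.findIdx?_cons, if_neg (by simp [hb])]
      by_cases ha : PySem.Str.isIn "@attribute" l
      · obtain ⟨i, hidx⟩ : ∃ i, PySem.List.index? (PySem.Str.split₀ l) "@attribute" = some i := by
          simp only [pvGoodAttr, ha, Bool.not_true, Bool.false_or] at hgl
          cases h : PySem.List.index? (PySem.Str.split₀ l) "@attribute" with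
          | none => rw [h] at hgl; simp at hgl
          | some i => exact ⟨i, rfl⟩
        have ha' : PySem.Chars.isIn ['@','a','t','t','r','i','b','u','t','e'] l.toList = true := by
          simpa using ha
        have hidx' : List.idxOf? "@attribute" (PySem.Str.split₀ l) = some i := by
          simpa [PySem.List.index?] using hidx
        have hstep : arffStep (false, H, acc) l =
            (false, H ++ (pvColName l).toList ++ [','], acc) := by
          simp [arffStep, ha', pvColName, PySem.List.index?, hidx']
        rw [hstep, ih _ _ hg']
        cases hf : rest.findIdx? pvIsBoundary with
        | none => rfl
        | some b => simp [headerChars_cons, ha', List.append_assoc]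
      · have haf : PySem.Str.isIn "@attribute" l = false := by
          cases h2 : PySem.Str.isIn "@attribute" l with
          | false => rfl
          | true => exact absurd h2 ha
        have hd : PySem.Str.isIn "@data" l = false := by
          cases hdc : PySem.Str.isIn "@data" l with
          | false => rfl
          | true =>
            exact absurd (by unfold pvIsBoundary; rw [hdc, haf]; rfl) hb
        have ha' : PySem.Chars.isIn ['@','a','t','t','r','i','b','u','t','e'] l.toList = false := by
          simpa using ha
        have hd' : PySem.Chars.isIn ['@','d','a','t','a'] l.toList = false := by simpa using hd
        have hstep : arffStep (false, H, acc) l = (false, H, acc) := by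
          simp [arffStep, ha', hd']
        rw [hstep, ih _ _ hg']
        cases hf : rest.findIdx? pvIsBoundary with
        | none => rfl
        | some b => simp [headerChars_cons, ha']

lemma header_eq (ls : List String) :
    String.ofList ((headerChars ls).dropLast) =
      PySem.Str.join ","
        ((ls.filter (fun l => PySem.Str.isIn "@attribute" l)).map pvColName) := by
  have h1 : headerChars ls =
      ((((ls.filter (fun l => PySem.Str.isIn "@attribute" l)).map pvColName).map
          String.toList).map (· ++ [','])).flatten := by
    simp [headerChars, List.map_map, Function.comp_def]
  rw [h1, dropLast_flatten_comma]
  have h2 := PySem.Str.toList_join ","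
    ((ls.filter (fun l => PySem.Str.isIn "@attribute" l)).map pvColName)
  have : (",").toList = [','] := rfl
  rw [this] at h2
  rw [← h2, String.ofList_toList]

-- ===== VERDICT (by name: the statement is the Claim_ definition above) =====
theorem ArfftoCsv_spec : Claim_equal_ArfftoCsv := by
  intro content _ hpre
  unfold Spec_ArfftoCsv ArfftoCsv ArfftoCsv_alt
  have hg : ∀ l ∈ content.takeWhile (fun l => !pvIsBoundary l), pvGoodAttr l = true := by
    intro l hl
    exact List.all_eq_true.mp hpre l hl
  rw [loopFalse content [] [] hg]
  cases hf : content.findIdx? pvIsBoundary with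
  | none => rfl
  | some b => simp [header_eq]

theorem ArfftoCsv_raises : Claim_raises_ArfftoCsv := by
  unfold Claim_raises_ArfftoCsv
  constructor
  · intro content _ hr hpre
    obtain ⟨hnone, hbad⟩ := hr
    apply hbad
    have hall : ∀ x ∈ content, pvIsBoundary x = false := List.findIdx?_eq_none_iff.mp hnone
    have htw : content.takeWhile (fun l => !pvIsBoundary l) = content :=
      List.takeWhile_eq_self_iff.mpr (by intro x hx; simp [hall x hx])
    rw [Pre_ArfftoCsv, htw] at hpre
    exact hpre
  · exact ⟨by decide, by decide, by decide⟩

-- self-check: the value B returns at the raise-region witness, extracted from ArfftoCsv_raises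
theorem ArfftoCsv_raises_witness :
    ArfftoCsv_alt pvRaiseWitness_ArfftoCsv = pvRaiseWitnessOut_ArfftoCsv := by
  have h := ArfftoCsv_raises
  unfold Claim_raises_ArfftoCsv at h
  exact h.2.2.2
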